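-- pv_equiv track=rewrite | github.com/maggieelkin/CovMutation | bin/MutationHelpers.py | node_muts_from_ref
-- ===== SOURCE A (Python) =====
-- def collapse_muts(mutations):
--     """
--     takes a list of mutations, if the position index is the same, it collapses into 1 mutation
--     i.e. D614F and F614G get collapsed to D614G
--
--     :param mutations: list of mutations
--     :type mutations: list
--     :return: collapsed list of mutations
--     :rtype: list
--     """
--     i = 0
--     j = i + 1
--     current = mutations[i]
--     while j < len(mutations):
--
--         next_mut = mutations[j]
--         if current[-1] == next_mut[0]:
--             current = current[0:-1] + next_mut[-1]
--         i = i + 1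
--         j = j + 1
--     if current[0] == current[-1]:
--         return []
--     else:
--         return [current]
--
-- def node_muts_from_ref(mutations):
--     """
--     takes a list of mutations from a node (node.spike_mutations) and collapses them such that the muations are
--     with reference to the reference sequence (WT is the reference)
--     :param mutations: list of mutations
--     :type mutations: list
--     :return: list of mutations with WT as reference sequence
--     :rtype: list
--     """
--     mutted = {}
--     for mut in mutations:
--         pos = mut[1:-1]
--         if pos not in mutted:
--             mutted[pos] = []
--         mutted[pos].append(mut)
--     final_muts = []
--     for pos, muts in mutted.items():
--         if len(muts) == 1:
--             final_muts.extend(muts)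
--         else:
--             final_muts.extend(collapse_muts(muts))
--     return final_muts
-- ===== SOURCE B (Python) =====
-- def node_muts_from_ref(mutations):
--     # single pass: position -> (collapsed mutation so far, count of mutations at that position)
--     state = {}
--     for mut in mutations:
--         pos = mut[1:-1]
--         if pos in state:
--             cur, cnt = state[pos]
--             if cur[-1] == mut[0]:
--                 cur = cur[:-1] + mut[-1]
--             state[pos] = (cur, cnt + 1)
--         else:
--             state[pos] = (mut, 1)
--     return [cur for cur, cnt in state.values() if cnt == 1 or cur[0] != cur[-1]]
-- ===== Notes on version B (the rewrite author's own statement) =====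
-- stated objective: simpler
-- what changed: Replaces the two-pass group-then-collapse structure (dict of per-position mutation lists plus a separate collapse_muts helper with its own inner while loop) by one pass that keeps per position only the collapsed-so-far mutation and a count, then emits results directly from that dict.
import Mathlib
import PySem

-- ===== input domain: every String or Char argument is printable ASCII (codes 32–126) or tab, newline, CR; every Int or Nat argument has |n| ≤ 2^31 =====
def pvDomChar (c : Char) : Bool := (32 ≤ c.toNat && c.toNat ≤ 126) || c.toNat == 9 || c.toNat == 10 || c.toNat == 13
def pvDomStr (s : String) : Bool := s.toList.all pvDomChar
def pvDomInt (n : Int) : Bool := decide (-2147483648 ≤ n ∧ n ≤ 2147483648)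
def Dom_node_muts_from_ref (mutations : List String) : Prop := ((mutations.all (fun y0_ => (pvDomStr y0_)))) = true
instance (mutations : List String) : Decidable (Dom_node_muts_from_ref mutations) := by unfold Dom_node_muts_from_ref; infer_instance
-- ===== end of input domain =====

-- B collapses each position in one pass, keeping per position only (collapsed mutation so far, count),
-- instead of A's two passes (dict of per-position lists, then a separate collapse helper): simpler decomposition, same return value.

-- ===== PORT A =====
-- chain step shared by both Pythons: `if current[-1] == mut[0]: current = current[:-1] + mut[-1]`
def pvStep (cur nxt : String) : String :=
  if PySem.Str.pyGet? cur (-1) = PySem.Str.pyGet? nxt 0 then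
    String.ofList ((PySem.Str.slice cur none (some (-1))).toList ++ (PySem.Str.pyGet? nxt (-1)).toList)
  else cur

-- `mu[1:-1]`
def pvPos (mu : String) : String := PySem.Str.slice mu (some 1) (some (-1))

-- collapse_muts; the Python indexes mutations[0] (IndexError on []), but it is only called on nonempty lists
def collapseMuts : List String → List String
  | [] => []
  | m :: rest =>
    let current := rest.foldl pvStep m
    if PySem.Str.pyGet? current 0 = PySem.Str.pyGet? current (-1) then [] else [current]

-- body of A's first loop: `if pos not in mutted: mutted[pos] = []` then `mutted[pos].append(mu)`
def pvStepA (d : PySem.Dict String (List String)) (mu : String) : PySem.Dict String (List String) :=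
  let pos := pvPos mu
  let d' := if d.contains pos then d else d.insert pos []
  d'.modify pos [] (fun l => l ++ [mu])

def node_muts_from_ref (mutations : List String) : List String :=
  let mutted := mutations.foldl pvStepA PySem.Dict.empty
  mutted.items.foldl (fun acc pm =>
    if pm.2.length = 1 then acc ++ pm.2 else acc ++ collapseMuts pm.2) []

-- ===== PORT B =====
-- body of B's single loop: update (current, count) for this position
def pvStepB (d : PySem.Dict String (String × Int)) (mu : String) : PySem.Dict String (String × Int) :=
  let pos := pvPos mu
  match d.get? pos with
  | some (cur, cnt) => d.insert pos (pvStep cur mu, cnt + 1)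
  | none => d.insert pos (mu, 1)

def node_muts_from_ref_alt (mutations : List String) : List String :=
  let state := mutations.foldl pvStepB PySem.Dict.empty
  (state.values.filter (fun p =>
    p.2 == 1 || !(PySem.Str.pyGet? p.1 0 == PySem.Str.pyGet? p.1 (-1)))).map (·.1)

-- ===== PRECONDITION & SPEC =====
-- Pre_ excludes exactly the inputs on which the Python A raises IndexError inside collapse_muts: the empty
-- string together with at least one other string of length ≤ 2 (all of which share the position key "");
-- B raises IndexError on those inputs too.
def Pre_node_muts_from_ref (mutations : List String) : Prop :=
  "" ∈ mutations → (mutations.filter (fun m => decide (PySem.Str.len m ≤ 2))).length ≤ 1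
instance (mutations : List String) : Decidable (Pre_node_muts_from_ref mutations) := by
  unfold Pre_node_muts_from_ref; infer_instance

def pvWitness_node_muts_from_ref : List String := ["D614F", "F614G", "A5B"]

def Spec_node_muts_from_ref (mutations : List String) (out : List String) : Prop := out = node_muts_from_ref_alt mutations
instance (mutations : List String) (out : List String) : Decidable (Spec_node_muts_from_ref mutations out) := by unfold Spec_node_muts_from_ref; infer_instance

-- ===== CLAIM (what is proved, stated in full; the proofs are below) =====
def Claim_equal_node_muts_from_ref : Prop := ∀ (mutations : List String), Dom_node_muts_from_ref mutations → Pre_node_muts_from_ref mutations → Spec_node_muts_from_ref mutations (node_muts_from_ref mutations)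

-- ===== LEMMAS AND PROOFS =====

-- A's collapse chain over a whole (nonempty) per-position group
def pvChain : List String → String
  | [] => ""
  | m :: rest => rest.foldl pvStep m

-- B's dict entry corresponding to A's per-position group
def pvF (p : String × List String) : String × (String × Int) :=
  (p.1, (pvChain p.2, (p.2.length : Int)))

lemma pvChain_append (l : List String) (m : String) (h : l ≠ []) :
    pvChain (l ++ [m]) = pvStep (pvChain l) m := by
  cases l with
  | nil => exact absurd rfl h
  | cons a t => simp [pvChain, List.foldl_append]

-- the loop invariant: B's dict is A's dict with every group replaced by (its chain, its size)
def pvInv (dA : PySem.Dict String (List String)) (dB : PySem.Dict String (String × Int)) : Prop :=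
  dB.items = dA.items.map pvF ∧ (dA.items.map Prod.fst).Nodup ∧ ∀ p ∈ dA.items, p.2 ≠ []

lemma pvInv_step (dA : PySem.Dict String (List String)) (dB : PySem.Dict String (String × Int))
    (mu : String) (h : pvInv dA dB) : pvInv (pvStepA dA mu) (pvStepB dB mu) := by
  obtain ⟨hI, hN, hne⟩ := h
  set pos := pvPos mu with hpos
  have hpred : ((fun p : String × (String × Int) => p.1 == pos) ∘ pvF)
      = (fun p : String × List String => p.1 == pos) := by
    funext p; simp [pvF]
  have hcont : dB.contains pos = dA.contains pos := by
    simp only [PySem.Dict.contains, hI, List.any_map, hpred]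
  have hget : dB.get? pos
      = (dA.items.find? (fun p => p.1 == pos)).map (fun p => (pvChain p.2, (p.2.length : Int))) := by
    simp only [PySem.Dict.get?, hI, List.find?_map, hpred, Option.map_map]
    rfl
  by_cases hc : dA.contains pos = true
  · -- position already present
    obtain ⟨q, hq⟩ : ∃ q, dA.items.find? (fun p => p.1 == pos) = some q := by
      have : (dA.items.find? (fun p => p.1 == pos)).isSome := by
        rw [List.find?_isSome]
        simpa [PySem.Dict.contains, List.any_eq_true] using hc
      exact Option.isSome_iff_exists.mp this
    have hqmem : q ∈ dA.items := List.mem_of_find?_eq_some hq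
    have hqpos : q.1 = pos := by
      have := List.find?_some hq
      simpa using this
    have hAget : dA.get? pos = some q.2 := by simp [PySem.Dict.get?, hq]
    have hA : pvStepA dA mu = dA.insert pos (q.2 ++ [mu]) := by
      simp [pvStepA, hc, PySem.Dict.modify, PySem.Dict.getD, hAget, ← hpos]
    have hB : pvStepB dB mu = dB.insert pos (pvStep (pvChain q.2) mu, (q.2.length : Int) + 1) := by
      simp [pvStepB, hget, hq, ← hpos]
    have hcB : dB.contains pos = true := by rw [hcont]; exact hc
    have hitA : (pvStepA dA mu).items
        = dA.items.map (fun p => if p.1 == pos then (pos, q.2 ++ [mu]) else p) := by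
      rw [hA]; exact PySem.Dict.items_insert_of_contains dA _ hc
    have hitB : (pvStepB dB mu).items
        = dA.items.map ((fun r : String × (String × Int) =>
            if r.1 == pos then (pos, (pvStep (pvChain q.2) mu, (q.2.length : Int) + 1)) else r) ∘ pvF) := by
      rw [hB, PySem.Dict.items_insert_of_contains dB _ hcB, hI, List.map_map]
    have huniq : ∀ p ∈ dA.items, p.1 = pos → p = q :=
      fun p hp hppos => List.inj_on_of_nodup_map hN hp hqmem (by rw [hppos, hqpos])
    refine ⟨?_, ?_, ?_⟩
    · rw [hitA, hitB, List.map_map]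
      refine List.map_congr_left (fun p hp => ?_)
      by_cases hppos : p.1 = pos
      · have hpq : p = q := huniq p hp hppos
        subst hpq
        have hch : pvChain (p.2 ++ [mu]) = pvStep (pvChain p.2) mu :=
          pvChain_append p.2 mu (hne p hp)
        have hlen1 : ((p.2 ++ [mu]).length : Int) = (p.2.length : Int) + 1 := by
          simp
        simp only [Function.comp, pvF, hppos, beq_self_eq_true, if_pos, hch, hlen1]
      · simp [Function.comp, pvF, hppos]
    · rw [hitA, List.map_map]
      have : ∀ p ∈ dA.items,
          (Prod.fst ∘ fun p : String × List String =>
            if p.1 == pos then (pos, q.2 ++ [mu]) else p) p = p.1 := by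
        intro p hp
        by_cases hppos : p.1 = pos <;> simp [Function.comp, hppos]
      rw [List.map_congr_left this]
      exact hN
    · rw [hitA]
      intro p hp
      obtain ⟨r, hr, hrp⟩ := List.mem_map.mp hp
      by_cases hrpos : r.1 = pos
      · simp [hrpos] at hrp; simp [← hrp]
      · simp [hrpos] at hrp; rw [← hrp]; exact hne r hr
  · -- new position
    have hcf : dA.contains pos = false := by simpa using hc
    have hcB : dB.contains pos = false := by rw [hcont]; exact hcf
    have hnomatch : ∀ p ∈ dA.items, ¬(p.1 = pos) := by
      intro p hp hpp
      apply hc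
      simp only [PySem.Dict.contains, List.any_eq_true]
      exact ⟨p, hp, by simp [hpp]⟩
    have hfa : dA.items.find? (fun p => p.1 == pos) = none := by
      rw [List.find?_eq_none]
      intro p hp; simpa using hnomatch p hp
    have hA : (pvStepA dA mu).items = dA.items ++ [(pos, [mu])] := by
      have hins : (dA.insert pos ([] : List String)).items = dA.items ++ [(pos, [])] :=
        PySem.Dict.items_insert_of_not_contains dA _ hcf
      have hcd' : (dA.insert pos ([] : List String)).contains pos = true := by
        simp [PySem.Dict.contains, hins]
      have hgd' : (dA.insert pos ([] : List String)).get? pos = some [] := by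
        simp [PySem.Dict.get?, hins, List.find?_append, hfa]
      have hstep : pvStepA dA mu
          = (dA.insert pos ([] : List String)).insert pos ([] ++ [mu]) := by
        simp [pvStepA, hcf, PySem.Dict.modify, PySem.Dict.getD, hgd', ← hpos]
      rw [hstep, PySem.Dict.items_insert_of_contains _ _ hcd', hins, List.map_append]
      congr 1
      · refine (List.map_congr_left fun p hp => ?_).trans (List.map_id _)
        simp [hnomatch p hp]
      · simp
    have hB : (pvStepB dB mu).items = dB.items ++ [(pos, (mu, 1))] := by
      have hgB : dB.get? pos = none := by rw [hget, hfa]; rfl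
      have hstep : pvStepB dB mu = dB.insert pos (mu, 1) := by
        simp [pvStepB, hgB, ← hpos]
      rw [hstep, PySem.Dict.items_insert_of_not_contains dB _ hcB]
    refine ⟨?_, ?_, ?_⟩
    · rw [hA, hB, hI, List.map_append]
      simp [pvF, pvChain]
    · rw [hA, List.map_append]
      simp only [List.map_cons, List.map_nil]
      rw [List.nodup_append]
      refine ⟨hN, by simp, ?_⟩
      intro k hk
      obtain ⟨p, hp, hpk⟩ := List.mem_map.mp hk
      have hkpos : ¬(k = pos) := fun hkp => hnomatch p hp (by rw [hpk, hkp])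
      simpa using hkpos
    · rw [hA]
      intro p hp
      rcases List.mem_append.mp hp with h1 | h2
      · exact hne p h1
      · simp at h2; simp [h2]

lemma pvInv_foldl (muts : List String) (dA : PySem.Dict String (List String))
    (dB : PySem.Dict String (String × Int)) (h : pvInv dA dB) :
    pvInv (muts.foldl pvStepA dA) (muts.foldl pvStepB dB) := by
  induction muts generalizing dA dB with
  | nil => exact h
  | cons m t ih => exact ih _ _ (pvInv_step dA dB m h)

lemma pvHead (p : String × List String) (hp : p.2 ≠ []) :
    (if p.2.length = 1 then p.2 else collapseMuts p.2)
    = (if ((pvF p).2.2 == 1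
          || !(PySem.Str.pyGet? (pvF p).2.1 0 == PySem.Str.pyGet? (pvF p).2.1 (-1)))
        then [(pvF p).2.1] else []) := by
  match hpc : p.2 with
  | [] => exact absurd hpc hp
  | [m] => simp [pvF, hpc, pvChain]
  | m :: m2 :: rest =>
    have hlen : ¬((m :: m2 :: rest).length = 1) := by simp
    have hlenI : (((m :: m2 :: rest).length : Int) == 1) = false := by
      rw [beq_eq_false_iff_ne]
      simp only [List.length_cons]
      push_cast
      omega
    simp only [hpc, pvF, hlenI, Bool.false_or]
    rw [if_neg hlen]
    by_cases heq : PySem.Str.pyGet? (pvChain (m :: m2 :: rest)) 0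
        = PySem.Str.pyGet? (pvChain (m :: m2 :: rest)) (-1)
    · rw [if_neg (by simpa [pvChain] using heq)]
      simp only [collapseMuts, pvChain] at heq ⊢
      rw [if_pos heq]
    · rw [if_pos (by simpa [pvChain] using heq)]
      simp only [collapseMuts, pvChain] at heq ⊢
      rw [if_neg heq]

lemma pvFinal (L : List (String × List String)) (h : ∀ p ∈ L, p.2 ≠ []) :
    L.foldl (fun acc pm => if pm.2.length = 1 then acc ++ pm.2 else acc ++ collapseMuts pm.2) []
    = (((L.map pvF).map Prod.snd).filter (fun p =>
        p.2 == 1 || !(PySem.Str.pyGet? p.1 0 == PySem.Str.pyGet? p.1 (-1)))).map (·.1) := by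
  have hfn : (fun (acc : List String) (pm : String × List String) =>
      if pm.2.length = 1 then acc ++ pm.2 else acc ++ collapseMuts pm.2)
      = (fun acc pm => acc ++ (if pm.2.length = 1 then pm.2 else collapseMuts pm.2)) := by
    funext acc pm; split <;> rfl
  rw [hfn, PySem.List.foldl_append_eq_flatMap, List.nil_append]
  induction L with
  | nil => rfl
  | cons p t ih =>
    have hp : p.2 ≠ [] := h p (by simp)
    have ht : ∀ q ∈ t, q.2 ≠ [] := fun q hq => h q (by simp [hq])
    rw [List.flatMap_cons, List.map_cons, List.map_cons, List.filter_cons, ih ht,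
      pvHead p hp]
    by_cases hpred : ((pvF p).2.2 == 1
        || !(PySem.Str.pyGet? (pvF p).2.1 0 == PySem.Str.pyGet? (pvF p).2.1 (-1))) = true
    · simp only [hpred]
      simp
    · rw [Bool.not_eq_true] at hpred
      simp only [hpred]
      simp

-- ===== VERDICT (by name: the statement is the Claim_ definition above) =====
theorem node_muts_from_ref_spec : Claim_equal_node_muts_from_ref := by
  intro mutations _ _
  unfold Spec_node_muts_from_ref node_muts_from_ref node_muts_from_ref_alt
  have hinv : pvInv (mutations.foldl pvStepA PySem.Dict.empty)
      (mutations.foldl pvStepB PySem.Dict.empty) :=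
    pvInv_foldl mutations _ _ ⟨rfl, by simp [PySem.Dict.empty], by simp [PySem.Dict.empty]⟩
  obtain ⟨hI, _, hne⟩ := hinv
  simp only [PySem.Dict.values, hI]
  exact pvFinal _ hne
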